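-- pv_equiv track=rewrite | github.com/rodri-oliveira/atendeJA-ND-Imoveis- | app/domain/realestate/detection_utils.py | detect_property_type
-- ===== SOURCE A (Python) =====
-- from typing import Optional
--
-- def detect_property_type(text: str) -> Optional[str]:
--     """Detecta tipo de imóvel (house/apartment/commercial/land) priorizando regex."""
--     # PRIORIDADE 1: Regex exato (mais confiável)
--     text_lower = text.lower().strip()
--     if text_lower in ["casa", "sobrado"]:
--         return "house"
--     if text_lower in ["apartamento", "apto", "ap", "flat"]:
--         return "apartment"
--     if text_lower in ["comercial", "loja", "sala", "sala comercial", "ponto comercial"]: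
--         return "commercial"
--     if text_lower in ["terreno", "lote", "área"]:
--         return "land"
--
--     # PRIORIDADE 2: Regex parcial (contém palavra-chave)
--     if "casa" in text_lower or "sobrado" in text_lower:
--         return "house"
--     if any(kw in text_lower for kw in ["apartamento", "apto", "ap", "flat"]):
--         return "apartment"
--     if any(kw in text_lower for kw in ["comercial", "loja", "sala"]):
--         return "commercial"
--     if any(kw in text_lower for kw in ["terreno", "lote"]):
--         return "land"
--
--     return None
-- ===== SOURCE B (Python) =====
-- from typing import Optional
--
-- # one ordered table; single interleaved pass (exact-or-partial per category)
-- _TABLE = [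
--     ("house", {"casa", "sobrado"}, ["casa", "sobrado"]),
--     ("apartment", {"apartamento", "apto", "ap", "flat"}, ["apartamento", "apto", "ap", "flat"]),
--     ("commercial", {"comercial", "loja", "sala", "sala comercial", "ponto comercial"}, ["comercial", "loja", "sala"]),
--     ("land", {"terreno", "lote", "área"}, ["terreno", "lote"]),
-- ]
--
-- def detect_property_type(text: str) -> Optional[str]:
--     text_lower = text.lower().strip()
--     for label, exact, partial in _TABLE:
--         if text_lower in exact or any(kw in text_lower for kw in partial):
--             return label
--     return None
-- ===== Notes on version B (the rewrite author's own statement) =====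
-- stated objective: simpler
-- what changed: Replaced the two sequential exact-then-partial sweeps over four hard-coded keyword groups by one ordered category table scanned in a single interleaved pass (exact-or-partial per category); equivalence rests on no earlier category's partial keyword being a substring of a later category's exact keyword.
import Mathlib
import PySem

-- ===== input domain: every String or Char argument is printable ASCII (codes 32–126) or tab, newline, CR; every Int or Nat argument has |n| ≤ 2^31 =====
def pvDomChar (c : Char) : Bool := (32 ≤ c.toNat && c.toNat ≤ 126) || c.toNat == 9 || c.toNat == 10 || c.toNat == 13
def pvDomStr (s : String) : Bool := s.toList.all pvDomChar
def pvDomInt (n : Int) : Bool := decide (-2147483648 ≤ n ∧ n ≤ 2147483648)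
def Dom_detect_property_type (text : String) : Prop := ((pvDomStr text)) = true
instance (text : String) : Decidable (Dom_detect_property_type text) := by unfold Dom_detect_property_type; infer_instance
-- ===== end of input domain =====

-- B replaces A's two sequential exact-then-partial keyword sweeps by one ordered
-- category table scanned in a single interleaved pass — simpler decomposition, same cost.

-- ===== PORT A =====
def detect_property_type (text : String) : Option String :=
  let text_lower := PySem.Str.strip (PySem.Str.lower text)
  if text_lower ∈ ["casa", "sobrado"] then some "house"
  else if text_lower ∈ ["apartamento", "apto", "ap", "flat"] then some "apartment"
  else if text_lower ∈ ["comercial", "loja", "sala", "sala comercial", "ponto comercial"] then some "commercial"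
  else if text_lower ∈ ["terreno", "lote", "área"] then some "land"
  else if PySem.Str.isIn "casa" text_lower || PySem.Str.isIn "sobrado" text_lower then some "house"
  else if (["apartamento", "apto", "ap", "flat"].any fun kw => PySem.Str.isIn kw text_lower) then some "apartment"
  else if (["comercial", "loja", "sala"].any fun kw => PySem.Str.isIn kw text_lower) then some "commercial"
  else if (["terreno", "lote"].any fun kw => PySem.Str.isIn kw text_lower) then some "land"
  else none

-- ===== PORT B =====
-- the ordered category table: (label, exact keywords as a set, partial keywords)
def pvTable : List (String × PySem.Set String × List String) :=
  [("house", PySem.Set.ofList ["casa", "sobrado"], ["casa", "sobrado"]),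
   ("apartment", PySem.Set.ofList ["apartamento", "apto", "ap", "flat"], ["apartamento", "apto", "ap", "flat"]),
   ("commercial", PySem.Set.ofList ["comercial", "loja", "sala", "sala comercial", "ponto comercial"], ["comercial", "loja", "sala"]),
   ("land", PySem.Set.ofList ["terreno", "lote", "área"], ["terreno", "lote"])]

-- the 'for label, exact, partial in _TABLE' loop with early return
def pvScanTable (table : List (String × PySem.Set String × List String)) (text_lower : String) : Option String :=
  match table with
  | [] => none
  | (label, exact, part) :: rest =>
    if PySem.Set.contains exact text_lower || part.any (fun kw => PySem.Str.isIn kw text_lower) then some label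
    else pvScanTable rest text_lower

def detect_property_type_alt (text : String) : Option String :=
  pvScanTable pvTable (PySem.Str.strip (PySem.Str.lower text))

-- ===== PRECONDITION & SPEC =====
def Spec_detect_property_type (text : String) (out : Option String) : Prop := out = detect_property_type_alt text
instance (text : String) (out : Option String) : Decidable (Spec_detect_property_type text out) := by unfold Spec_detect_property_type; infer_instance

-- ===== CLAIM (what is proved, stated in full; the proofs are below) =====
def Claim_equal_detect_property_type : Prop := ∀ (text : String), Dom_detect_property_type text → Spec_detect_property_type text (detect_property_type text)

-- ===== LEMMAS AND PROOFS =====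

-- core agreement after the shared normalisation, for ANY lowered/stripped string t
theorem pv_core (t : String) :
    pvScanTable pvTable t =
    (if t ∈ ["casa", "sobrado"] then some "house"
     else if t ∈ ["apartamento", "apto", "ap", "flat"] then some "apartment"
     else if t ∈ ["comercial", "loja", "sala", "sala comercial", "ponto comercial"] then some "commercial"
     else if t ∈ ["terreno", "lote", "área"] then some "land"
     else if PySem.Str.isIn "casa" t || PySem.Str.isIn "sobrado" t then some "house"
     else if (["apartamento", "apto", "ap", "flat"].any fun kw => PySem.Str.isIn kw t) then some "apartment"
     else if (["comercial", "loja", "sala"].any fun kw => PySem.Str.isIn kw t) then some "commercial"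
     else if (["terreno", "lote"].any fun kw => PySem.Str.isIn kw t) then some "land"
     else none) := by
  by_cases h : t ∈ (["casa","sobrado","apartamento","apto","ap","flat","comercial","loja","sala","sala comercial","ponto comercial","terreno","lote","área"] : List String)
  · fin_cases h <;> decide
  · simp only [List.mem_cons, List.not_mem_nil, or_false, not_or] at h
    obtain ⟨h1,h2,h3,h4,h5,h6,h7,h8,h9,h10,h11,h12,h13,h14⟩ := h
    simp [pvScanTable, pvTable, h1,h2,h3,h4,h5,h6,h7,h8,h9,h10,h11,h12,h13,h14]

-- ===== VERDICT (by name: the statement is the Claim_ definition above) =====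
theorem detect_property_type_spec : Claim_equal_detect_property_type := by
  intro text _
  unfold Spec_detect_property_type detect_property_type_alt detect_property_type
  exact (pv_core (PySem.Str.strip (PySem.Str.lower text))).symm
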